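-- pv_equiv track=rewrite | github.com/Jmjcoke/Theo | apps/api/src/nodes/chat/compact_re_ranker_node.py | _parse_ranking_response
-- ===== SOURCE A (Python) =====
-- def _parse_ranking_response(response: str, original_results: list) -> list:
--     """Parse LLM ranking response and reorder results."""
--     try:
--         numbers = []
--         for part in response.replace(' ', '').split(','):
--             try:
--                 num = int(part.strip())
--                 if 1 <= num <= len(original_results):
--                     numbers.append(num - 1)
--             except ValueError:
--                 continue
--
--         reranked = []
--         used_indices = set()
--         for idx in numbers:
--             if idx not in used_indices:
--                 reranked.append(original_results[idx])
--                 used_indices.add(idx)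
--         for idx, result in enumerate(original_results):
--             if idx not in used_indices:
--                 reranked.append(result)
--         return reranked
--     except Exception: return original_results
-- ===== SOURCE B (Python) =====
-- def _parse_ranking_response(response: str, original_results: list) -> list:
--     """Parse LLM ranking response and reorder results."""
--     try:
--         n = len(original_results)
--         numbers = []
--         for part in response.replace(' ', '').split(','):
--             try:
--                 num = int(part.strip())
--                 if 1 <= num <= n:
--                     numbers.append(num - 1)
--             except ValueError:
--                 continue
--         priority = {idx: rank for rank, idx in enumerate(dict.fromkeys(numbers))}
--         order = sorted(range(n), key=lambda i: priority.get(i, n + i))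
--         return [original_results[i] for i in order]
--     except Exception:
--         return original_results
-- ===== Notes on version B (the rewrite author's own statement) =====
-- stated objective: alternative
-- what changed: B keeps A's parsing loop but replaces A's two append passes with a used-indices set by building a priority map from the deduped parsed order and computing the final order with one sort of range(n) keyed on priority.get(i, n + i).
import Mathlib
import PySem

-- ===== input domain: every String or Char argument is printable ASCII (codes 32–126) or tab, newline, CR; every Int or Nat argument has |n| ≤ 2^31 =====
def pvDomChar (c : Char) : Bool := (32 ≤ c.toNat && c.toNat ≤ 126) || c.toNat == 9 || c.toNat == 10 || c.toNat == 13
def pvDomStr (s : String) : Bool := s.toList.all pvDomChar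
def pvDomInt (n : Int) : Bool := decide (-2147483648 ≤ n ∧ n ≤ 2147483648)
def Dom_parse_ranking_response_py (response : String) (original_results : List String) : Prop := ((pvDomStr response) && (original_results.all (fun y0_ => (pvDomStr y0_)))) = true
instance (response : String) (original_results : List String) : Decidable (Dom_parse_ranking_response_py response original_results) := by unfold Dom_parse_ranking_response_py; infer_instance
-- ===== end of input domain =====

-- B replaces A's two append passes over a used-set by a priority map and one stable sort of
-- range(n) keyed on priority.get(i, n + i); objective: alternative decomposition, not speed.
-- Neither program can raise (the int() ValueError is caught, indices are range-guarded), so the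
-- outer try/except of both Pythons is dead and both ports omit it; no Pre_ is needed.

-- ===== PORT A =====
-- parse loop of A: numbers of valid 1-based ranks, shifted to 0-based, duplicates kept
def pvNumbersA (response : String) (n : Int) : List Int :=
  (PySem.Chars.splitOn (PySem.Str.replace response " " "").toList [',']).foldl
    (fun numbers part =>
      match PySem.Int.ofChars? (PySem.Chars.strip part) with
      | none => numbers                                   -- except ValueError: continue
      | some num => if 1 ≤ num ∧ num ≤ n then numbers ++ [num - 1] else numbers)
    []

def parse_ranking_response_py (response : String) (original_results : List String) : List String :=
  let numbers := pvNumbersA response (original_results.length : Int)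
  -- first loop: append original_results[idx] for fresh idx, tracking used_indices
  -- (idx is range-guarded by the parse, so original_results[idx] never raises: pyGetD is exact here)
  let st := numbers.foldl
    (fun (st : List String × PySem.Set Int) idx =>
      if PySem.Set.contains st.2 idx then st
      else (st.1 ++ [PySem.List.pyGetD original_results idx ""], PySem.Set.add st.2 idx))
    ([], PySem.Set.empty)
  -- second loop: append the unused results in enumerate order
  (PySem.List.enumerate original_results 0).foldl
    (fun reranked p => if PySem.Set.contains st.2 p.1 then reranked else reranked ++ [p.2])
    st.1

-- ===== PORT B =====
-- parse loop of B: identical to A's by design (the hint keeps the parsing; the reorder differs)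
def pvNumbersB (response : String) (n : Int) : List Int :=
  (PySem.Chars.splitOn (PySem.Str.replace response " " "").toList [',']).foldl
    (fun numbers part =>
      match PySem.Int.ofChars? (PySem.Chars.strip part) with
      | none => numbers
      | some num => if 1 ≤ num ∧ num ≤ n then numbers ++ [num - 1] else numbers)
    []

def parse_ranking_response_py_alt (response : String) (original_results : List String) : List String :=
  let n : Int := original_results.length
  let numbers := pvNumbersB response n
  let ranked := PySem.List.dedup numbers                  -- dict.fromkeys(numbers)
  let priority : PySem.Dict Int Int :=                    -- {idx: rank for rank, idx in enumerate(ranked)}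
    (PySem.List.enumerate ranked 0).foldl (fun d p => d.insert p.2 p.1) PySem.Dict.empty
  let order := PySem.List.sorted (PySem.List.pyRange 0 n 1)
    (fun i => priority.getD i (n + i)) false              -- sorted(range(n), key=...)
  order.map (fun i => PySem.List.pyGetD original_results i "")  -- guarded as in A

-- ===== PRECONDITION & SPEC =====
def Spec_parse_ranking_response_py (response : String) (original_results : List String) (out : List String) : Prop := out = parse_ranking_response_py_alt response original_results
instance (response : String) (original_results : List String) (out : List String) : Decidable (Spec_parse_ranking_response_py response original_results out) := by unfold Spec_parse_ranking_response_py; infer_instance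

-- ===== CLAIM (what is proved, stated in full; the proofs are below) =====
def Claim_equal_parse_ranking_response_py : Prop := ∀ (response : String) (original_results : List String), Dom_parse_ranking_response_py response original_results → Spec_parse_ranking_response_py response original_results (parse_ranking_response_py response original_results)

-- ===== LEMMAS AND PROOFS =====

-- the two parse loops are the same loop
theorem pvNumbers_eq : pvNumbersB = pvNumbersA := rfl

-- an invariant preserved by the parse loop, used only for index bounds
theorem pvFoldAux (P : Int → Prop) (n : Int) (hP : ∀ num : Int, 1 ≤ num ∧ num ≤ n → P (num - 1))
    (parts : List (List Char)) (init : List Int) (hinit : ∀ x ∈ init, P x) :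
    ∀ x ∈ parts.foldl
      (fun numbers part =>
        match PySem.Int.ofChars? (PySem.Chars.strip part) with
        | none => numbers
        | some num => if 1 ≤ num ∧ num ≤ n then numbers ++ [num - 1] else numbers)
      init, P x := by
  induction parts generalizing init with
  | nil => exact hinit
  | cons p ps ih =>
    intro x hx
    refine ih _ ?_ x hx
    intro y hy
    cases h : PySem.Int.ofChars? (PySem.Chars.strip p) with
    | none => simp only [h] at hy; exact hinit y hy
    | some num =>
      simp [h] at hy
      split at hy
      · rcases List.mem_append.1 hy with h' | h'
        · exact hinit y h'
        · simp at h'; subst h'; exact hP num (by assumption)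
      · exact hinit y hy

-- every parsed 0-based index lies in [0, n)
theorem pvNumbersA_bounds (response : String) (n : Int) :
    ∀ x ∈ pvNumbersA response n, 0 ≤ x ∧ x < n := by
  unfold pvNumbersA
  exact pvFoldAux _ n (fun num h => ⟨by omega, by omega⟩) _ [] (by simp)

-- the fresh (first-occurrence, not-yet-seen) elements A's first loop keeps
def pvFresh (s : PySem.Set Int) : List Int → List Int
  | [] => []
  | x :: xs => if PySem.Set.contains s x then pvFresh s xs else x :: pvFresh (PySem.Set.add s x) xs

-- A's first loop, fully generalized over the accumulator and the used-set
theorem pvFoldA (orig : List String) (l : List Int) (acc : List String) (s : PySem.Set Int) :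
    l.foldl
      (fun (st : List String × PySem.Set Int) idx =>
        if PySem.Set.contains st.2 idx then st
        else (st.1 ++ [PySem.List.pyGetD orig idx ""], PySem.Set.add st.2 idx))
      (acc, s)
    = (acc ++ (pvFresh s l).map (fun i => PySem.List.pyGetD orig i ""), PySem.Set.update s l) := by
  induction l generalizing acc s with
  | nil => simp [pvFresh, PySem.Set.update]
  | cons x xs ih =>
    by_cases h : PySem.Set.contains s x
    · simp only [List.foldl_cons, h, if_pos, pvFresh]
      rw [ih, PySem.Set.update_cons, PySem.Set.add_of_mem ((PySem.Set.contains_iff s x).1 h)]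
    · simp only [List.foldl_cons, h, Bool.false_eq_true, if_false, pvFresh]
      rw [ih]
      simp only [List.map_cons, List.append_assoc, List.singleton_append]
      exact congrArg _ (PySem.Set.update_cons s x xs).symm

theorem pvFresh_eq (l : List Int) (s : PySem.Set Int) :
    pvFresh s l = (PySem.Set.update s l).drop s.length := by
  induction l generalizing s with
  | nil => simp [pvFresh, PySem.Set.update]
  | cons x xs ih =>
    rw [PySem.Set.update_cons]
    by_cases h : x ∈ s
    · rw [pvFresh, if_pos ((PySem.Set.contains_iff s x).2 h), PySem.Set.add_of_mem h]
      exact ih s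
    · rw [pvFresh, if_neg (fun hc => h ((PySem.Set.contains_iff s x).1 hc)), ih (PySem.Set.add s x),
        PySem.Set.add_of_not_mem h, PySem.Set.update_eq_append_filter]
      rw [List.append_assoc, List.drop_left]
      simp

theorem pvFresh_empty (l : List Int) : pvFresh PySem.Set.empty l = PySem.Set.ofList l := by
  rw [pvFresh_eq, PySem.Set.update_empty]
  rfl

-- A's second loop: an 'if used: skip else append' fold is a filter
theorem pvFoldIfNot {A B : Type} (l : List A) (c : A -> Bool) (f : A -> B) (acc : List B) :
    l.foldl (fun r x => if c x then r else r ++ [f x]) acc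
    = acc ++ (l.filter (fun x => !c x)).map f := by
  rw [← PySem.List.foldl_append_if (p := fun x => !c x) (f := f)]
  apply PySem.List.foldl_congr_mem
  intro a x _
  cases c x <;> simp

-- B's priority dict: items, keys and lookups
theorem pvPriority_items (ds : List Int) (hnd : ds.Nodup) :
    ((PySem.List.enumerate ds 0).foldl (fun d p => d.insert p.2 p.1)
      (PySem.Dict.empty : PySem.Dict Int Int)).items
    = (PySem.List.enumerate ds 0).map (fun p => (p.2, p.1)) := by
  have h := PySem.Dict.items_foldl_insert_fresh (PySem.List.enumerate ds 0)
      (fun p => p.2) (fun p => p.1) PySem.Dict.empty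
      (fun a _ => PySem.Dict.contains_empty _)
      (by rw [PySem.List.map_snd_enumerate]; exact hnd)
  simpa [PySem.Dict.items] using h

theorem pvPriority_keys (ds : List Int) (hnd : ds.Nodup) :
    ((PySem.List.enumerate ds 0).foldl (fun d p => d.insert p.2 p.1)
      (PySem.Dict.empty : PySem.Dict Int Int)).keys = ds := by
  simp only [PySem.Dict.keys, pvPriority_items ds hnd, List.map_map]
  have : ((fun p : Int × Int => p.1) ∘ fun p : Int × Int => (p.2, p.1)) = fun p : Int × Int => p.2 := rfl
  rw [this, PySem.List.map_snd_enumerate]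

theorem pvPriority_getD_mem (ds : List Int) (hnd : ds.Nodup) (k : Nat) (hk : k < ds.length) (d0 : Int) :
    ((PySem.List.enumerate ds 0).foldl (fun d p => d.insert p.2 p.1)
      (PySem.Dict.empty : PySem.Dict Int Int)).getD ds[k] d0 = (k : Int) := by
  have hmem : ((k : Int), ds[k]) ∈ PySem.List.enumerate ds 0 := by
    rw [PySem.List.mem_enumerate_iff]
    exact ⟨k, hk, by simp⟩
  have hitem : (ds[k], (k : Int)) ∈ ((PySem.List.enumerate ds 0).foldl (fun d p => d.insert p.2 p.1)
      (PySem.Dict.empty : PySem.Dict Int Int)).items := by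
    rw [pvPriority_items ds hnd]
    exact List.mem_map.2 ⟨_, hmem, rfl⟩
  exact PySem.Dict.getD_of_mem_items _ hitem (by rw [pvPriority_keys ds hnd]; exact hnd) d0

theorem pvPriority_getD_not_mem (ds : List Int) (hnd : ds.Nodup) (j d0 : Int) (hj : j ∉ ds) :
    ((PySem.List.enumerate ds 0).foldl (fun d p => d.insert p.2 p.1)
      (PySem.Dict.empty : PySem.Dict Int Int)).getD j d0 = d0 := by
  apply PySem.Dict.getD_of_not_contains _ d0
  by_contra h
  exact hj (by rw [← pvPriority_keys ds hnd]
               exact (PySem.Dict.contains_iff_mem_keys _ _).1 (Bool.not_eq_false _ |>.mp h))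

-- the sorted order B computes IS: ranked indices first, then the unused indices in order
theorem pvSorted_eq' (ds : List Int) (n : Int) (hnd : ds.Nodup) (hbd : ∀ x ∈ ds, 0 ≤ x ∧ x < n) :
    PySem.List.sorted (PySem.List.pyRange 0 n 1)
      (fun i => ((PySem.List.enumerate ds 0).foldl
          (fun d p => d.insert p.2 p.1) (PySem.Dict.empty : PySem.Dict Int Int)).getD i (n + i)) false
    = ds ++ (PySem.List.pyRange 0 n 1).filter (fun j => !(PySem.Set.contains ds j)) := by
  have hq : ∀ x : Int, (!(PySem.Set.contains ds x)) = true ↔ x ∉ ds := by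
    intro x; simp
  have hsub : ∀ x ∈ ds, x ∈ PySem.List.pyRange 0 n 1 := by
    intro x hx
    rcases hbd x hx with ⟨h0, h1⟩
    exact (PySem.List.mem_pyRange_one).2 ⟨h0, h1⟩
  have hlen : ds.length ≤ (PySem.List.pyRange 0 n 1).length :=
    (List.subperm_of_subset hnd hsub).length_le
  have hlenn : (ds.length : Int) ≤ n ∨ ds.length = 0 := by
    rw [PySem.List.length_pyRange_one] at hlen
    omega
  apply PySem.List.sorted_eq_of_perm_of_pairwise_lt
  · rw [List.perm_ext_iff_of_nodup]
    · intro a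
      constructor
      · intro ha
        rcases List.mem_append.1 ha with h | h
        · exact hsub a h
        · exact (List.mem_filter.1 h).1
      · intro ha
        by_cases h : a ∈ ds
        · exact List.mem_append.2 (Or.inl h)
        · exact List.mem_append.2 (Or.inr (List.mem_filter.2 ⟨ha, (hq a).2 h⟩))
    · rw [List.nodup_append]
      refine ⟨hnd, List.Nodup.filter _ (PySem.List.nodup_pyRange_one 0 n), ?_⟩
      intro a ha b hbf
      exact fun he => (hq b).1 (List.mem_filter.1 hbf).2 (he ▸ ha)
    · exact PySem.List.nodup_pyRange_one 0 n
  · rw [List.pairwise_append]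
    refine ⟨?_, ?_, ?_⟩
    · rw [List.pairwise_iff_getElem]
      intro i j hi hj hij
      rw [pvPriority_getD_mem ds hnd i hi, pvPriority_getD_mem ds hnd j hj]
      exact_mod_cast hij
    · refine List.Pairwise.imp_of_mem ?_ ((PySem.List.pairwise_lt_pyRange_one 0 n).filter _)
      intro a b ha hb2 hab
      rw [pvPriority_getD_not_mem ds hnd a _ ((hq a).1 (List.mem_filter.1 ha).2),
        pvPriority_getD_not_mem ds hnd b _ ((hq b).1 (List.mem_filter.1 hb2).2)]
      omega
    · intro a ha b hb2
      rcases List.mem_iff_getElem.1 ha with ⟨i, hi, rfl⟩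
      rw [pvPriority_getD_mem ds hnd i hi,
        pvPriority_getD_not_mem ds hnd b _ ((hq b).1 (List.mem_filter.1 hb2).2)]
      have hb0 : 0 ≤ b := ((PySem.List.mem_pyRange_one).1 (List.mem_filter.1 hb2).1).1
      rcases hlenn with h | h <;> omega

-- ===== VERDICT (by name: the statement is the Claim_ definition above) =====
theorem parse_ranking_response_py_spec : Claim_equal_parse_ranking_response_py := by
  intro response orig _
  unfold Spec_parse_ranking_response_py
  set n : Int := (orig.length : Int) with hn
  set numbers := pvNumbersA response n with hnum
  set ds : List Int := PySem.Set.ofList numbers with hds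
  have hnd : ds.Nodup := PySem.Set.nodup_ofList numbers
  have hbd : ∀ x ∈ ds, 0 ≤ x ∧ x < n := by
    intro x hx
    exact pvNumbersA_bounds response n x ((PySem.Set.mem_ofList numbers x).1 hx)
  have hA : parse_ranking_response_py response orig
      = ds.map (fun i => PySem.List.pyGetD orig i "")
        ++ ((PySem.List.pyRange 0 n 1).filter (fun j => !(PySem.Set.contains ds j))).map
            (fun i => PySem.List.pyGetD orig i "") := by
    show (PySem.List.enumerate orig 0).foldl _ _ = _
    rw [pvFoldA orig numbers [] PySem.Set.empty, pvFoldIfNot]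
    simp only [pvFresh_empty, PySem.Set.update_empty, List.nil_append, ← hds]
    congr 1
    rw [PySem.List.enumerate_eq_map_pyRange orig "", List.filter_map, List.map_map]
    simp [Function.comp_def, PySem.List.len_eq, ← hn]
  have hB : parse_ranking_response_py_alt response orig
      = (ds ++ (PySem.List.pyRange 0 n 1).filter (fun j => !(PySem.Set.contains ds j))).map
          (fun i => PySem.List.pyGetD orig i "") := by
    show (PySem.List.sorted _ _ _).map _ = _
    rw [pvNumbers_eq, ← hn, ← hnum, PySem.List.dedup_eq_ofList, ← hds, pvSorted_eq' ds n hnd hbd]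
  rw [hA, hB, List.map_append]
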